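-- pv_equiv track=rewrite | github.com/cafaray/atco.de-fights | cyclicSequence.py | cyclicSequence
-- ===== SOURCE A (Python) =====
-- def cyclicSequence(sequence):
--     i = sequence.index(min(sequence))
--     seq = []
--     for x in range(i, len(sequence)+i):
--         pos = x if x < len(sequence) else x - len(sequence)
--         seq += [sequence[pos]]
--     for x in range(len(seq)-1):
--         if seq[x] >= seq[x+1]:
--             return False
--     return True
-- ===== SOURCE B (Python) =====
-- def cyclicSequence(sequence):
--     n = len(sequence)
--     count = 0
--     for i in range(n):
--         if sequence[i] >= sequence[(i + 1) % n]:
--             count += 1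
--     return count == 1
-- ===== Notes on version B (the rewrite author's own statement) =====
-- stated objective: simpler
-- what changed: Instead of locating the minimum, building the rotated list and scanning it, B makes one pass counting cyclic descents (positions where an element is >= its cyclic successor) and returns whether that count is exactly 1.
import Mathlib
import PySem

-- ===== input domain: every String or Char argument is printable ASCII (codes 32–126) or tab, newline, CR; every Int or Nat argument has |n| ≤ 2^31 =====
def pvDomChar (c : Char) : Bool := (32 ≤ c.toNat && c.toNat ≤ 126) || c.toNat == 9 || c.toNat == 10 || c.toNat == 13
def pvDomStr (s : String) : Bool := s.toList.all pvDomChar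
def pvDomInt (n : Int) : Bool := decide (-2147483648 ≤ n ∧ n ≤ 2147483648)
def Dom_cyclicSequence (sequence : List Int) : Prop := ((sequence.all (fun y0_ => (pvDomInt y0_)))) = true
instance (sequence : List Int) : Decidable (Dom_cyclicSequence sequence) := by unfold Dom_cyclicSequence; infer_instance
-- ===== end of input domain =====

-- B replaces A's rotate-to-minimum-then-scan by a single pass counting cyclic descents (simpler; return-value equivalence).

-- ===== PORT A =====
-- A's second loop: 'for x in range(len(seq)-1): if seq[x] >= seq[x+1]: return False' / 'return True'
def cyclicLoopA (seq : List Int) : List Int → Bool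
  | [] => true
  | x :: r =>
    if PySem.List.pyGetD seq (x + 1) 0 ≤ PySem.List.pyGetD seq x 0 then false
    else cyclicLoopA seq r

def cyclicSequence (sequence : List Int) : Bool :=
  match PySem.List.min? sequence (fun v => v) with
  | none => false          -- Python: min([]) raises ValueError; excluded by Pre_
  | some m =>
    match PySem.List.index? sequence m with
    | none => false        -- unreachable: the minimum is a member of the list
    | some i =>
      let seq := (PySem.List.pyRange (i : Int) (PySem.List.len sequence + (i : Int)) 1).foldl
        (fun acc x =>
          let pos := if x < PySem.List.len sequence then x else x - PySem.List.len sequence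
          acc ++ [PySem.List.pyGetD sequence pos 0]) []
      cyclicLoopA seq (PySem.List.pyRange 0 (PySem.List.len seq - 1) 1)

-- ===== PORT B =====
def cyclicSequence_alt (sequence : List Int) : Bool :=
  let n := PySem.List.len sequence
  let count := (PySem.List.pyRange 0 n 1).foldl
    (fun c i =>
      if PySem.List.pyGetD sequence (PySem.Int.mod (i + 1) n) 0 ≤ PySem.List.pyGetD sequence i 0
      then c + 1 else c) (0 : Int)
  count == 1

-- ===== PRECONDITION & SPEC =====
-- Pre_ excludes only the empty list, on which Python A raises ValueError (min() of an empty sequence).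
def Pre_cyclicSequence (sequence : List Int) : Prop := sequence ≠ []
instance (sequence : List Int) : Decidable (Pre_cyclicSequence sequence) := by unfold Pre_cyclicSequence; infer_instance
def pvWitness_cyclicSequence : List Int := [3, 1, 2]

def Spec_cyclicSequence (sequence : List Int) (out : Bool) : Prop := out = cyclicSequence_alt sequence
instance (sequence : List Int) (out : Bool) : Decidable (Spec_cyclicSequence sequence out) := by unfold Spec_cyclicSequence; infer_instance

-- ===== CLAIM (what is proved, stated in full; the proofs are below) =====
def Claim_equal_cyclicSequence : Prop := ∀ (sequence : List Int), Dom_cyclicSequence sequence → Pre_cyclicSequence sequence → Spec_cyclicSequence sequence (cyclicSequence sequence)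

-- ===== LEMMAS AND PROOFS =====

-- A's early-return scan equals 'no adjacent index in the range is a descent', counted
lemma loopA_countP (seq : List Int) (r : List Int) :
    cyclicLoopA seq r =
      decide (r.countP (fun x => decide (PySem.List.pyGetD seq (x + 1) 0 ≤ PySem.List.pyGetD seq x 0)) = 0) := by
  induction r with
  | nil => simp [cyclicLoopA]
  | cons x r ih =>
    by_cases hx : PySem.List.pyGetD seq (x + 1) 0 ≤ PySem.List.pyGetD seq x 0
    · simp [cyclicLoopA, hx]
    · simp [cyclicLoopA, hx, ih]

-- number of adjacent descents (l[k] >= l[k+1]) of a list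
def adjDesc : List Int → Nat
  | a :: b :: t => (if b ≤ a then 1 else 0) + adjDesc (b :: t)
  | _ => 0

-- the descent contribution of the junction 'last of u → head of v'
def joinDesc (u v : List Int) : Nat :=
  match u.getLast?, v.head? with
  | some a, some b => if b ≤ a then 1 else 0
  | _, _ => 0

-- number of cyclic descents (wrapping last → first)
def cycDesc (l : List Int) : Nat := adjDesc l + joinDesc l l

lemma adjDesc_append (u v : List Int) :
    adjDesc (u ++ v) = adjDesc u + adjDesc v + joinDesc u v := by
  induction u with
  | nil => simp [adjDesc, joinDesc]
  | cons a u ih =>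
    cases u with
    | nil =>
      cases v with
      | nil => simp [adjDesc, joinDesc]
      | cons b t => simp [adjDesc, joinDesc]; omega
    | cons b t =>
      simp only [List.cons_append, adjDesc] at *
      rw [ih]
      simp [joinDesc, List.getLast?_cons_cons]
      omega

-- the cyclic-descent count is invariant under rotation
lemma cycDesc_rotate (u v : List Int) : cycDesc (u ++ v) = cycDesc (v ++ u) := by
  rcases eq_or_ne u [] with rfl | hu; · simp
  rcases eq_or_ne v [] with rfl | hv; · simp
  unfold cycDesc
  rw [adjDesc_append, adjDesc_append]
  have h1 : joinDesc (u ++ v) (u ++ v) = joinDesc v u := by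
    unfold joinDesc
    rw [List.getLast?_append_of_ne_nil u hv, List.head?_append_of_ne_nil u hu]
  have h2 : joinDesc (v ++ u) (v ++ u) = joinDesc u v := by
    unfold joinDesc
    rw [List.getLast?_append_of_ne_nil v hu, List.head?_append_of_ne_nil v hv]
  rw [h1, h2]; omega

lemma adjCount (xs : List Int) :
    (List.range (xs.length - 1)).countP
      (fun k => decide (xs.getD (k + 1) 0 ≤ xs.getD k 0)) = adjDesc xs := by
  match xs with
  | [] => simp [adjDesc]
  | [a] => simp [adjDesc]
  | a :: b :: t =>
    have ih := adjCount (b :: t)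
    simp only [List.length_cons, Nat.add_sub_cancel] at *
    rw [List.range_succ_eq_map]
    simp only [List.countP_cons, List.countP_map]
    simp only [List.getD_cons_succ] at ih
    simp only [Function.comp_def, Nat.succ_eq_add_one, List.getD_cons_succ, List.getD_cons_zero]
    rw [ih]
    simp [adjDesc]
    omega

-- bridge: the pyRange/pyGetD form of the adjacent-descent count
lemma countP_pyRange_adj (xs : List Int) :
    (PySem.List.pyRange 0 ((xs.length : Int) - 1) 1).countP
      (fun i => decide (PySem.List.pyGetD xs (i + 1) 0 ≤ PySem.List.pyGetD xs i 0)) = adjDesc xs := by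
  rcases Nat.eq_zero_or_pos xs.length with h0 | hpos
  · rw [List.length_eq_zero_iff] at h0; subst h0
    rw [PySem.List.pyRange_one_eq_nil (by simp)]
    simp [adjDesc]
  · have hc : ((xs.length : Int) - 1) = ((xs.length - 1 : Nat) : Int) := by omega
    rw [hc, PySem.List.pyRange_zero_natCast, List.countP_map, ← adjCount xs]
    apply List.countP_congr
    intro k _
    simp only [Function.comp_def, PySem.List.pyGetD_natCast]
    have : ((k : Int) + 1) = ((k + 1 : Nat) : Int) := by omega
    rw [this, PySem.List.pyGetD_natCast]

lemma map_range_getD_take (xs : List Int) (i : Nat) (h : i ≤ xs.length) :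
    (List.range i).map (fun k => xs.getD k 0) = xs.take i := by
  apply List.ext_getElem
  · simp [h]
  · intro n h1 h2
    simp only [List.getElem_map, List.getElem_range, List.getElem_take]
    rw [List.getD_eq_getElem]

-- A's rebuilt list is the rotation of the input that starts at index i
lemma seq_rot (xs : List Int) (i : Nat) (hi : i ≤ xs.length) :
    (PySem.List.pyRange (i : Int) ((xs.length : Int) + (i : Int)) 1).map
      (fun x => PySem.List.pyGetD xs (if x < (xs.length : Int) then x else x - (xs.length : Int)) 0)
      = xs.drop i ++ xs.take i := by
  rw [PySem.List.pyRange_one_append (i : Int) (xs.length : Int) ((xs.length : Int) + (i : Int))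
      (by omega) (by omega), List.map_append]
  congr 1
  · rw [List.map_congr_left (g := fun x => PySem.List.pyGetD xs x 0)
      (fun x hx => by
        have hb := (PySem.List.mem_pyRange_one.mp hx).2
        simp [if_pos hb])]
    rw [PySem.List.map_pyGetD_pyRange' xs 0 (by omega)]
    simp
  · rw [PySem.List.pyRange_one, List.map_map]
    have he : ((xs.length : Int) + (i : Int) - (xs.length : Int)).toNat = i := by omega
    rw [he, ← map_range_getD_take xs i hi]
    apply List.map_congr_left
    intro k hk
    have hk' : k < i := List.mem_range.mp hk
    simp only [Function.comp_def]
    rw [if_neg (by omega)]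
    have : ((xs.length : Int) + (k : Int) - (xs.length : Int)) = ((k : Nat) : Int) := by omega
    rw [this, PySem.List.pyGetD_natCast]

lemma joinDesc_self (xs : List Int) (h : xs ≠ []) :
    joinDesc xs xs = if xs.head h ≤ xs.getLast h then 1 else 0 := by
  unfold joinDesc
  rw [List.getLast?_eq_some_getLast h, List.head?_eq_some_head h]

-- B evaluates to 'the cyclic-descent count is exactly 1'
lemma alt_eq (xs : List Int) (h : xs ≠ []) :
    cyclicSequence_alt xs = decide (cycDesc xs = 1) := by
  have hL : 1 ≤ xs.length := List.length_pos_iff.mpr h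
  simp only [cyclicSequence_alt]
  rw [PySem.List.foldl_ite_add_one
    (fun i => PySem.List.pyGetD xs (PySem.Int.mod (i + 1) (PySem.List.len xs)) 0 ≤ PySem.List.pyGetD xs i 0)
    (PySem.List.pyRange 0 (PySem.List.len xs) 1) 0]
  have hc : List.countP
      (fun i => decide (PySem.List.pyGetD xs (PySem.Int.mod (i + 1) (PySem.List.len xs)) 0 ≤ PySem.List.pyGetD xs i 0))
      (PySem.List.pyRange 0 (PySem.List.len xs) 1) = cycDesc xs := by
    have hrange : PySem.List.pyRange 0 (PySem.List.len xs) 1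
        = PySem.List.pyRange 0 ((xs.length : Int) - 1) 1 ++ [(xs.length : Int) - 1] := by
      rw [← PySem.List.pyRange_one_succ_right (a := 0) (b := (xs.length : Int) - 1) (by omega),
        PySem.List.len_eq]
      congr 1
      omega
    rw [hrange, List.countP_append]
    have hadj : List.countP
        (fun i => decide (PySem.List.pyGetD xs (PySem.Int.mod (i + 1) (PySem.List.len xs)) 0 ≤ PySem.List.pyGetD xs i 0))
        (PySem.List.pyRange 0 ((xs.length : Int) - 1) 1) = adjDesc xs := by
      rw [← countP_pyRange_adj xs]
      apply List.countP_congr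
      intro i hi
      have hb := PySem.List.mem_pyRange_one.mp hi
      have hmod : PySem.Int.mod (i + 1) (PySem.List.len xs) = i + 1 := by
        rw [PySem.List.len_eq, PySem.Int.mod_eq_emod_of_pos (by omega),
          Int.emod_eq_of_lt (by omega) (by omega)]
      simp only [decide_eq_true_eq]
      rw [hmod]
    have hwrapP : (PySem.List.pyGetD xs (PySem.Int.mod (((xs.length : Int) - 1) + 1) (PySem.List.len xs)) 0
          ≤ PySem.List.pyGetD xs ((xs.length : Int) - 1) 0)
        ↔ xs.head h ≤ xs.getLast h := by
      have hmod : PySem.Int.mod (((xs.length : Int) - 1) + 1) (PySem.List.len xs) = 0 := by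
        rw [PySem.List.len_eq, show ((xs.length : Int) - 1) + 1 = (xs.length : Int) by omega,
          PySem.Int.mod_eq_emod_of_pos (by omega)]
        simp
      have hgl : PySem.List.pyGetD xs ((xs.length : Int) - 1) 0 = xs.getLast h := by
        rw [show ((xs.length : Int) - 1) = ((xs.length - 1 : Nat) : Int) by omega,
          PySem.List.pyGetD_natCast, List.getLast_eq_getElem, List.getD_eq_getElem xs 0 (by omega)]
      have hhd : PySem.List.pyGetD xs 0 0 = xs.head h := by
        rw [PySem.List.pyGetD_zero, List.getD_eq_getElem xs 0 (by omega), List.head_eq_getElem]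
      rw [hmod, hgl, hhd]
    rw [hadj, List.countP_cons, List.countP_nil, decide_eq_decide.mpr hwrapP]
    unfold cycDesc
    rw [joinDesc_self xs h]
    simp only [decide_eq_true_eq]
    simp
    infer_instance
  rw [hc, Bool.eq_iff_iff]
  simp only [beq_iff_eq, decide_eq_true_eq]
  omega

-- A's scan over the range evaluates to 'no adjacent descent'
lemma loop_eq (l : List Int) :
    cyclicLoopA l (PySem.List.pyRange 0 (PySem.List.len l - 1) 1) = decide (adjDesc l = 0) := by
  rw [loopA_countP, decide_eq_decide]
  simp only [PySem.List.len_eq]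
  rw [countP_pyRange_adj l]

theorem mainEq (xs : List Int) (h : xs ≠ []) : cyclicSequence xs = cyclicSequence_alt xs := by
  obtain ⟨m, hmin⟩ : ∃ m, PySem.List.min? xs (fun v => v) = some m := by
    cases e : PySem.List.min? xs (fun v => v) with
    | none => exact absurd ((PySem.List.min?_eq_none_iff _ _).mp e) h
    | some m => exact ⟨m, rfl⟩
  have hmem := PySem.List.min?_mem hmin
  have hle : ∀ y ∈ xs, m ≤ y := fun y hy => PySem.List.min?_isMin hmin y hy
  obtain ⟨i, hidx⟩ : ∃ i, PySem.List.index? xs m = some i :=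
    Option.isSome_iff_exists.mp ((PySem.List.index?_isSome_iff xs m).mpr hmem)
  obtain ⟨hk, hxi, -⟩ := PySem.List.getElem_of_index?_eq_some hidx
  simp only [cyclicSequence, hmin, hidx]
  rw [PySem.List.foldl_append_singleton_eq_map
    (fun x => PySem.List.pyGetD xs (if x < PySem.List.len xs then x else x - PySem.List.len xs) 0)]
  rw [List.nil_append]
  have hseq : (PySem.List.pyRange (i : Int) (PySem.List.len xs + (i : Int)) 1).map
      (fun x => PySem.List.pyGetD xs (if x < PySem.List.len xs then x else x - PySem.List.len xs) 0)
      = xs.drop i ++ xs.take i := by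
    simp only [PySem.List.len_eq]
    exact seq_rot xs i (le_of_lt hk)
  rw [hseq, loop_eq, alt_eq xs h]
  have hrot : cycDesc xs = cycDesc (xs.drop i ++ xs.take i) := by
    conv_lhs => rw [← List.take_append_drop i xs]
    exact cycDesc_rotate _ _
  have hdne : xs.drop i ≠ [] := by
    intro hnil
    have := congrArg List.length hnil
    simp at this
    omega
  have hjoin : joinDesc (xs.drop i ++ xs.take i) (xs.drop i ++ xs.take i) = 1 := by
    obtain ⟨a, ha⟩ : ∃ a, (xs.drop i ++ xs.take i).getLast? = some a :=
      Option.isSome_iff_exists.mp (by simp [List.getLast?_isSome]; omega)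
    have hamem : a ∈ xs := by
      rcases List.mem_append.mp (List.mem_of_getLast? ha) with hx | hx
      · exact List.drop_subset _ _ hx
      · exact List.take_subset _ _ hx
    have hhead : (xs.drop i ++ xs.take i).head? = some m := by
      rw [List.head?_append_of_ne_nil _ hdne, List.head?_drop, List.getElem?_eq_getElem hk, hxi]
    unfold joinDesc
    rw [ha, hhead]
    simp [hle a hamem]
  rw [decide_eq_decide]
  unfold cycDesc at hrot ⊢
  rw [hjoin] at hrot
  omega

-- ===== VERDICT (by name: the statement is the Claim_ definition above) =====
theorem cyclicSequence_spec : Claim_equal_cyclicSequence := by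
  intro sequence _ hpre
  unfold Spec_cyclicSequence
  exact mainEq sequence hpre
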